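-- pv_equiv track=rewrite | github.com/ftyers/ftyers.github.io | 2018-komp-ling/practicals/unigram_pos_tagger_fourth_practical/tagger.py | max_word_tags
-- ===== SOURCE A (Python) =====
-- def max_word_tags(words):
-- 	# choose the most freq tag for each word
-- 	words_and_tags = {}
-- 	for word in words:
-- 		if len(words[word]) == 1:
-- 			words_and_tags[word] = words[word][0][0]
-- 		elif len(words[word]) > 1:
-- 			tags = []
-- 			for i in words[word]:
-- 				tags.append(i)
-- 			max_tag = max([j[1] for j in tags])
-- 			for tag in tags:
-- 				if tag[1] == max_tag:
-- 					words_and_tags[word] = tag[0]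
-- 	return words_and_tags
-- ===== SOURCE B (Python) =====
-- def max_word_tags(words):
--     # one uniform scan per word: keep the best tag, ties broken toward the LAST maximal tag
--     words_and_tags = {}
--     for word in words:
--         best = None
--         for tag, count in words[word]:
--             if best is None or count >= best[1]:
--                 best = (tag, count)
--         if best is not None:
--             words_and_tags[word] = best[0]
--     return words_and_tags
-- ===== Notes on version B (the rewrite author's own statement) =====
-- stated objective: simpler
-- what changed: Replaces A's len==1/len>1 branch split, the list copy, and the max-then-rescan double pass with one uniform single scan per word that keeps the running best (>= so the last maximal tag wins, matching A's tie-break).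
import Mathlib
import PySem

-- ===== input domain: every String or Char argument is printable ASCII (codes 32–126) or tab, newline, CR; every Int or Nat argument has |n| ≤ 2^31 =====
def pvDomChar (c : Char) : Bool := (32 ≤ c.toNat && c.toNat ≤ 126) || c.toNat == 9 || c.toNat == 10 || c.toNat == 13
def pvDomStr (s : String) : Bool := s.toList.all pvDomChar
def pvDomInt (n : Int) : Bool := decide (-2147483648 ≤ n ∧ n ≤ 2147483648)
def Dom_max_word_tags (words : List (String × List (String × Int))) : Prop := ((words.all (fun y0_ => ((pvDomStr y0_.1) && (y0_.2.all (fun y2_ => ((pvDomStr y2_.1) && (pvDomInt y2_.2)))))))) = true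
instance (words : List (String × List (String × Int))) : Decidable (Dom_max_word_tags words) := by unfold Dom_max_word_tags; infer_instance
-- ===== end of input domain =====

-- B is a simpler re-decomposition: one uniform scan per word keeping a running best
-- (>= so the last maximal tag wins, matching A's tie-break), instead of A's len==1/len>1
-- branch split, list copy, and max-then-rescan double pass.

-- ===== PORT A =====
-- step for one dict entry: A's loop body (len==1 branch / len>1 branch with copy, max, rescan)
def pvStepA (d : PySem.Dict String String) (p : String × List (String × Int)) : PySem.Dict String String :=
  let w := p.1
  let ts := p.2
  if ts.length == 1 then
    match PySem.List.pyGet? ts 0 with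
    | some t => d.insert w t.1
    | none => d
  else if ts.length > 1 then
    let tags := ts.foldl (fun acc i => acc ++ [i]) []
    match PySem.List.max? (tags.map (fun j => j.2)) (fun y => y) with
    | some maxTag => tags.foldl (fun d' tag => if tag.2 == maxTag then d'.insert w tag.1 else d') d
    | none => d
  else d

def max_word_tags (words : List (String × List (String × Int))) : List (String × String) :=
  (words.foldl pvStepA PySem.Dict.empty).items

-- ===== PORT B =====
-- running best over the tag list: last tag with maximal count wins
def pvBest (ts : List (String × Int)) : Option (String × Int) :=
  ts.foldl (fun best t =>
    match best with
    | none => some t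
    | some b => if b.2 ≤ t.2 then some t else some b) none

def max_word_tags_alt (words : List (String × List (String × Int))) : List (String × String) :=
  (words.foldl (fun d p =>
    match pvBest p.2 with
    | some b => d.insert p.1 b.1
    | none => d) PySem.Dict.empty).items

-- ===== PRECONDITION & SPEC =====
def Spec_max_word_tags (words : List (String × List (String × Int))) (out : List (String × String)) : Prop := out = max_word_tags_alt words
instance (words : List (String × List (String × Int))) (out : List (String × String)) : Decidable (Spec_max_word_tags words out) := by unfold Spec_max_word_tags; infer_instance

-- ===== CLAIM (what is proved, stated in full; the proofs are below) =====
def Claim_equal_max_word_tags : Prop := ∀ (words : List (String × List (String × Int))), Dom_max_word_tags words → Spec_max_word_tags words (max_word_tags words)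

-- ===== LEMMAS AND PROOFS =====

-- the copy loop `tags = []; for i in …: tags.append(i)` is the identity
lemma pvCopy_eq (ts : List (String × Int)) :
    ts.foldl (fun acc i => acc ++ [i]) [] = ts := by
  have h : ∀ (l acc : List (String × Int)), l.foldl (fun acc i => acc ++ [i]) acc = acc ++ l := by
    intro l
    induction l with
    | nil => simp
    | cons x xs ih => intro acc; simp [List.foldl, ih]
  simpa using h ts []

-- A's rescan loop only ever inserts at key w: the result is d or d.insert w x
lemma pvInner_shape (w : String) (m : Int) :
    ∀ (ts : List (String × Int)) (d : PySem.Dict String String),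
      (ts.foldl (fun d' tag => if tag.2 == m then d'.insert w tag.1 else d') d = d) ∨
      (∃ x, ts.foldl (fun d' tag => if tag.2 == m then d'.insert w tag.1 else d') d = d.insert w x) := by
  intro ts
  induction ts with
  | nil => intro d; left; rfl
  | cons t ts ih =>
    intro d
    rw [List.foldl_cons]
    by_cases h : t.2 = m
    · rw [if_pos (show (t.2 == m) = true by simp [h])]
      rcases ih (d.insert w t.1) with h' | ⟨x, h'⟩
      · rw [h']; right; exact ⟨t.1, rfl⟩
      · rw [h', PySem.Dict.insert_insert_self]; right; exact ⟨x, rfl⟩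
    · rw [if_neg (show ¬ ((t.2 == m) = true) by simp [h])]
      exact ih d

-- the key lemma: on a nonempty list, pvBest returns some b whose count is the max
-- of the counts, and A's max-then-rescan loop equals a single insert of b.1
lemma pvKey : ∀ (ts : List (String × Int)), ts ≠ [] →
    ∃ b, pvBest ts = some b ∧
      PySem.List.max? (ts.map (fun j => j.2)) (fun y => y) = some b.2 ∧
      ∀ (d : PySem.Dict String String) (w : String),
        ts.foldl (fun d' tag => if tag.2 == b.2 then d'.insert w tag.1 else d') d = d.insert w b.1 := by
  intro ts
  induction ts using List.reverseRecOn with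
  | nil => intro h; exact absurd rfl h
  | append_singleton ts t ih =>
    intro _
    rcases eq_or_ne ts [] with rfl | hne
    · refine ⟨t, rfl, ?_, ?_⟩
      · simp [PySem.List.max?_id_cons]
      · intro d w; simp [List.foldl]
    · obtain ⟨b, hb, hm, hf⟩ := ih hne
      obtain ⟨c, cs, hts⟩ : ∃ c cs, ts.map (fun j => j.2) = c :: cs := by
        cases hts : ts.map (fun j : String × Int => j.2) with
        | nil => exact absurd (List.map_eq_nil_iff.mp hts) hne
        | cons c cs => exact ⟨c, cs, rfl⟩
      have hm' : cs.foldl max c = b.2 := by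
        rw [hts, PySem.List.max?_id_cons] at hm
        exact Option.some_injective _ hm
      have hmax : PySem.List.max? ((ts ++ [t]).map (fun j => j.2)) (fun y => y)
          = some (max b.2 t.2) := by
        rw [List.map_append, hts]
        rw [show (c :: cs) ++ ([t].map (fun j : String × Int => j.2)) = c :: (cs ++ [t.2]) by simp]
        rw [PySem.List.max?_id_cons, List.foldl_append, hm']
        simp [List.foldl]
      by_cases hle : b.2 ≤ t.2
      · refine ⟨t, ?_, ?_, ?_⟩
        · simp [pvBest, List.foldl_append]; simp [pvBest] at hb; rw [hb]; simp [hle]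
        · rw [hmax]; congr 1; omega
        · intro d w
          rw [List.foldl_append]
          simp only [List.foldl, beq_self_eq_true, if_true]
          rcases pvInner_shape w t.2 ts d with h' | ⟨x, h'⟩
          · rw [h']
          · rw [h', PySem.Dict.insert_insert_self]
      · refine ⟨b, ?_, ?_, ?_⟩
        · simp [pvBest, List.foldl_append]; simp [pvBest] at hb; rw [hb]; simp [hle]
        · rw [hmax]; congr 1; omega
        · intro d w
          rw [List.foldl_append]
          have hne' : (t.2 == b.2) = false := by
            simp only [beq_eq_false_iff_ne, ne_eq]; omega
          simp only [List.foldl, hne']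
          exact hf d w

-- the two per-entry step functions are equal
lemma pvStep_eq : pvStepA = (fun d (p : String × List (String × Int)) =>
    match pvBest p.2 with
    | some b => d.insert p.1 b.1
    | none => d) := by
  funext d p
  obtain ⟨w, ts⟩ := p
  match ts with
  | [] => rfl
  | [t] =>
    simp [pvStepA, pvBest, List.foldl, PySem.List.pyGet?, PySem.List.pyIdx?]
  | t1 :: t2 :: rest =>
    obtain ⟨b, hb, hm, hf⟩ := pvKey (t1 :: t2 :: rest) (by simp)
    simp only [pvStepA]
    rw [if_neg (show ¬ (((t1 :: t2 :: rest).length == 1) = true) by simp)]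
    rw [if_pos (show (t1 :: t2 :: rest).length > 1 by simp)]
    rw [pvCopy_eq, hm, hb]
    exact hf d w

-- ===== VERDICT (by name: the statement is the Claim_ definition above) =====
theorem max_word_tags_spec : Claim_equal_max_word_tags := by
  intro words _
  show max_word_tags words = max_word_tags_alt words
  unfold max_word_tags max_word_tags_alt
  rw [pvStep_eq]
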